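-- pv_equiv track=rewrite | github.com/inassatus/wsu | 2018 Fall/cs355/HW3.py | lookupVal2
-- ===== SOURCE A (Python) =====
-- def lookupVal2(tL, k):
-- 	if tL==[]:
-- 		return None
-- 	newdic=[]
-- 	current=tL[-1]
-- 	while(current!=tL[0]):
-- 		newdic.append(current[1])
-- 		current=tL[current[0]]
-- 	newdic.append(current[1])
-- 	for x in newdic:
-- 		if k in x:
-- 			return x[k]
-- 	return None
-- ===== SOURCE B (Python) =====
-- def lookupVal2(tL, k):
--     if not tL:
--         return None
--     node = tL[-1]
--     while True:
--         if k in node[1]: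
--             return node[1][k]
--         if node == tL[0]:
--             return None
--         node = tL[node[0]]
-- ===== Notes on version B (the rewrite author's own statement) =====
-- stated objective: simpler
-- what changed: B interleaves the key test into a single parent-chain traversal with early exit, eliminating A's intermediate newdic list and its separate second scan loop.
import Mathlib
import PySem

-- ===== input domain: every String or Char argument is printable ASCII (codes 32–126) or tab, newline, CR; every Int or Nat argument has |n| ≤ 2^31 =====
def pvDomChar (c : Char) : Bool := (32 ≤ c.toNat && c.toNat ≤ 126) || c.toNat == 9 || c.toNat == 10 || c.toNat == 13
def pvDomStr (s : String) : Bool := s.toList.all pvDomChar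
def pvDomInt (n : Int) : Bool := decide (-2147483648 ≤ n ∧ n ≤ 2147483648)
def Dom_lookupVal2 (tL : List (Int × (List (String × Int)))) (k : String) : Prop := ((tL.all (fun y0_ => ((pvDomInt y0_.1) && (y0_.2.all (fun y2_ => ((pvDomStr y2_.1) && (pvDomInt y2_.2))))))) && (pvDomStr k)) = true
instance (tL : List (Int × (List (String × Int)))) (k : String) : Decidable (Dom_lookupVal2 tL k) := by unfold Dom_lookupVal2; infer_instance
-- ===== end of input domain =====

-- B replaces A's two phases (build the chain's dict list, then scan it) by one
-- parent-chain walk that tests the key at each node and exits early: simpler, no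
-- intermediate list, same return value on every input on which A returns.

-- ===== PORT A =====
-- the `while current != tL[0]` loop of A, collecting `newdic`; fuel-bounded.
-- Under Pre_ the loop terminates within tL.length steps, so fuel = tL.length is
-- exact; a `none` from pyGet? is Python's IndexError, excluded by Pre_.
def pvChainA (tL : List (Int × (List (String × Int)))) (first : Int × (List (String × Int))) :
    Nat → (Int × (List (String × Int))) → List (List (String × Int)) → List (List (String × Int))
  | 0, current, newdic => newdic ++ [current.2]
  | fuel + 1, current, newdic =>
    if current = first then newdic ++ [current.2]
    else
      match PySem.List.pyGet? tL current.1 with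
      | none => newdic ++ [current.2]
      | some next => pvChainA tL first fuel next (newdic ++ [current.2])

-- A's `for x in newdic: if k in x: return x[k]` scan (dict lookup = first match)
def pvScanA (k : String) : List (List (String × Int)) → Option Int
  | [] => none
  | x :: rest =>
    match x.lookup k with
    | some v => some v
    | none => pvScanA k rest

def lookupVal2 (tL : List (Int × (List (String × Int)))) (k : String) : Option Int :=
  match tL with
  | [] => none
  | first :: _ =>
    match PySem.List.pyGet? tL (-1) with
    | none => none
    | some current => pvScanA k (pvChainA tL first tL.length current [])

-- ===== PORT B =====
-- Source B's single `while True` walk: test the key, stop at tL[0], else follow the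
-- parent pointer; fuel-bounded like A's loop (tL.length + 1 nodes suffice under Pre_)
def pvWalkB (tL : List (Int × (List (String × Int)))) (first : Int × (List (String × Int))) (k : String) :
    Nat → (Int × (List (String × Int))) → Option Int
  | 0, _ => none
  | fuel + 1, node =>
    match node.2.lookup k with
    | some v => some v
    | none =>
      if node = first then none
      else
        match PySem.List.pyGet? tL node.1 with
        | none => none
        | some next => pvWalkB tL first k fuel next

def lookupVal2_alt (tL : List (Int × (List (String × Int)))) (k : String) : Option Int :=
  match tL with
  | [] => none
  | first :: _ =>
    match PySem.List.pyGet? tL (-1) with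
    | none => none
    | some node => pvWalkB tL first k (tL.length + 1) node

-- ===== PRECONDITION & SPEC =====
-- one step of the parent-pointer graph of the INPUT (none = dangling / out-of-range
-- parent, absorbed); used only by Pre_, not by either port
def pvStep (tL : List (Int × (List (String × Int)))) :
    Option (Int × (List (String × Int))) → Option (Int × (List (String × Int)))
  | none => none
  | some c => PySem.List.pyGet? tL c.1

-- Pre_ excludes exactly the inputs on which A's while-loop raises IndexError (an
-- out-of-range parent index) or never terminates (a parent-pointer cycle that misses
-- a node equal to tL[0]); A returns a value on precisely the admitted inputs, and the
-- condition is reachability in the input's parent graph: from the last node, the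
-- first node is reached within tL.length pointer steps.
def Pre_lookupVal2 (tL : List (Int × (List (String × Int)))) (k : String) : Prop :=
  tL = [] ∨ ∃ n : Nat, n ≤ tL.length ∧
    (pvStep tL)^[n] (PySem.List.pyGet? tL (-1)) = some tL.headI
instance (tL : List (Int × (List (String × Int)))) (k : String) : Decidable (Pre_lookupVal2 tL k) := by
  unfold Pre_lookupVal2; infer_instance

def pvWitness_lookupVal2 : (List (Int × (List (String × Int)))) × String :=
  ([(0, [("a", 1)]), (0, [("b", 2)])], "b")

def Spec_lookupVal2 (tL : List (Int × (List (String × Int)))) (k : String) (out : Option Int) : Prop := out = lookupVal2_alt tL k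
instance (tL : List (Int × (List (String × Int)))) (k : String) (out : Option Int) : Decidable (Spec_lookupVal2 tL k out) := by unfold Spec_lookupVal2; infer_instance

-- ===== CLAIM (what is proved, stated in full; the proofs are below) =====
def Claim_equal_lookupVal2 : Prop := ∀ (tL : List (Int × (List (String × Int)))) (k : String), Dom_lookupVal2 tL k → Pre_lookupVal2 tL k → Spec_lookupVal2 tL k (lookupVal2 tL k)

-- ===== LEMMAS AND PROOFS =====

-- scanning a concatenation: first hit in the prefix wins
theorem pvScanA_append (k : String) (a b : List (List (String × Int))) :
    pvScanA k (a ++ b) =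
      match pvScanA k a with
      | some v => some v
      | none => pvScanA k b := by
  induction a with
  | nil => simp [pvScanA]
  | cons x rest ih =>
    simp only [List.cons_append, pvScanA, ih]
    cases x.lookup k <;> rfl

-- the key invariant: A's "collect then scan" equals the prefix scan of the
-- accumulator followed by B's interleaved walk (with one extra unit of fuel,
-- since A's loop also appends the final node after the loop exits)
theorem pvScan_pvChain (tL : List (Int × (List (String × Int))))
    (first : Int × (List (String × Int))) (k : String) :
    ∀ (fuel : Nat) (current : Int × (List (String × Int)))
      (newdic : List (List (String × Int))),
      pvScanA k (pvChainA tL first fuel current newdic) =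
        match pvScanA k newdic with
        | some v => some v
        | none => pvWalkB tL first k (fuel + 1) current := by
  intro fuel
  induction fuel with
  | zero =>
    intro current newdic
    simp only [pvChainA, pvScanA_append, pvWalkB, pvScanA]
    cases pvScanA k newdic <;> cases current.2.lookup k <;>
      simp <;> split <;> [(intro; rfl); (cases PySem.List.pyGet? tL current.1 <;> simp [pvWalkB])]
  | succ fuel ih =>
    intro current newdic
    simp only [pvChainA]
    by_cases hf : current = first
    · simp only [if_pos hf, pvScanA_append, pvScanA]
      conv_rhs => rw [pvWalkB]
      cases pvScanA k newdic <;> cases current.2.lookup k <;> simp [hf]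
    · simp only [if_neg hf]
      cases hg : PySem.List.pyGet? tL current.1 with
      | none =>
        simp only [pvScanA_append, pvScanA]
        conv_rhs => rw [pvWalkB]
        cases pvScanA k newdic <;> cases current.2.lookup k <;> simp [hf, hg]
      | some next =>
        rw [ih next (newdic ++ [current.2])]
        simp only [pvScanA_append, pvScanA]
        conv_rhs => rw [pvWalkB]
        cases pvScanA k newdic <;> cases current.2.lookup k <;> simp [hf, hg]

-- ===== VERDICT (by name: the statement is the Claim_ definition above) =====
theorem lookupVal2_spec : Claim_equal_lookupVal2 := by
  intro tL k _ _
  unfold Spec_lookupVal2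
  cases tL with
  | nil => rfl
  | cons first rest =>
    simp only [lookupVal2, lookupVal2_alt]
    cases hg : PySem.List.pyGet? (first :: rest) (-1) with
    | none => rfl
    | some current =>
      simp only []
      rw [pvScan_pvChain (first :: rest) first k (first :: rest).length current []]
      rfl
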